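-- pv_equiv track=rewrite | github.com/mattzjack/112temp | rec1.4.py | formNumberFromOddDigits
-- ===== SOURCE A (Python) =====
-- def formNumberFromOddDigits(n):
--     newNum = 0
--     sign = n // abs(n)
--     n = abs(n)
--     currDigit = 0
--     while n > 0:
--         digit = n % 10
--         n //= 10
--         if digit in [1, 3, 5, 7, 9]:
--             newNum += digit * 10 ** currDigit
--             currDigit += 1
--     return newNum * sign
-- ===== SOURCE B (Python) =====
-- def formNumberFromOddDigits(n):
--     sign = n // abs(n)
--     result = 0
--     for c in str(abs(n)):
--         if c in '13579':
--             result = result * 10 + (ord(c) - 48)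
--     return result * sign
-- ===== Notes on version B (the rewrite author's own statement) =====
-- stated objective: idiomatic
-- what changed: Instead of peeling digits least-significant-first with %/// and reassembling with powers of ten, B scans the decimal string of abs(n) left to right and Horner-accumulates the odd digits; Pre_ excludes n=0, where both programs raise ZeroDivisionError.
import Mathlib
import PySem

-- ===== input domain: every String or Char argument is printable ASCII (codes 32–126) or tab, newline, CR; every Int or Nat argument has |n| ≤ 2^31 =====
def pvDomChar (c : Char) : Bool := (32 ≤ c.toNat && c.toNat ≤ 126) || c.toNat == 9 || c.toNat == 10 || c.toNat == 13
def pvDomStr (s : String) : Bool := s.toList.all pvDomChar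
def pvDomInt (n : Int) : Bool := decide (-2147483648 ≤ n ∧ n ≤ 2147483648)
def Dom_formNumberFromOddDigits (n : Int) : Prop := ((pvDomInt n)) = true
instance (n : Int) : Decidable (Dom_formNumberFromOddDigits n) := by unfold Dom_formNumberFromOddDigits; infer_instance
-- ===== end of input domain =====

-- B scans str(abs(n)) left to right and Horner-accumulates the odd digits, instead of
-- A's least-significant-first %10 peeling with powers of ten (objective: idiomatic).

-- ===== PORT A =====
-- the while loop of A: state (n, newNum, currDigit), n already nonnegative (it is abs(n))
def pvLoopA : Nat → Int → Nat → Int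
  | 0, newNum, _ => newNum
  | m+1, newNum, currDigit =>
      let digit : Int := (((m+1) % 10 : Nat) : Int)
      let m' := (m+1) / 10
      if digit = 1 ∨ digit = 3 ∨ digit = 5 ∨ digit = 7 ∨ digit = 9 then
        pvLoopA m' (newNum + digit * 10 ^ currDigit) (currDigit + 1)
      else
        pvLoopA m' newNum currDigit
  termination_by m _ _ => m
  decreasing_by all_goals exact Nat.div_lt_self (Nat.succ_pos m) (by omega)

def formNumberFromOddDigits (n : Int) : Int :=
  -- sign = n // abs(n): ZeroDivisionError when n = 0, excluded by Pre_
  let sign := PySem.Int.floordiv n |n|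
  pvLoopA n.natAbs 0 0 * sign

-- ===== PORT B =====
def formNumberFromOddDigits_alt (n : Int) : Int :=
  -- sign = n // abs(n): ZeroDivisionError when n = 0, excluded by Pre_
  let sign := PySem.Int.floordiv n |n|
  let result := (PySem.Int.toChars |n|).foldl
    (fun acc c => if c ∈ ['1', '3', '5', '7', '9'] then acc * 10 + ((c.toNat : Int) - 48) else acc) 0
  result * sign

-- ===== PRECONDITION & SPEC =====
-- n = 0 is excluded: there both Pythons raise ZeroDivisionError on 'n // abs(n)'.
def Pre_formNumberFromOddDigits (n : Int) : Prop := n ≠ 0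
instance (n : Int) : Decidable (Pre_formNumberFromOddDigits n) := by unfold Pre_formNumberFromOddDigits; infer_instance
def pvWitness_formNumberFromOddDigits : Int := 13570

def Spec_formNumberFromOddDigits (n : Int) (out : Int) : Prop := out = formNumberFromOddDigits_alt n
instance (n : Int) (out : Int) : Decidable (Spec_formNumberFromOddDigits n out) := by unfold Spec_formNumberFromOddDigits; infer_instance

-- ===== CLAIM (what is proved, stated in full; the proofs are below) =====
def Claim_equal_formNumberFromOddDigits : Prop := ∀ (n : Int), Dom_formNumberFromOddDigits n → Pre_formNumberFromOddDigits n → Spec_formNumberFromOddDigits n (formNumberFromOddDigits n)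

-- ===== LEMMAS AND PROOFS =====

-- the number formed from the odd digits of m (least-significant-first recursion)
def pvOdds : Nat → Int
  | 0 => 0
  | m+1 =>
      if (m+1) % 10 % 2 = 1 then (((m+1) % 10 : Nat) : Int) + 10 * pvOdds ((m+1) / 10)
      else pvOdds ((m+1) / 10)
  termination_by m => m
  decreasing_by all_goals exact Nat.div_lt_self (Nat.succ_pos m) (by omega)

-- the count of odd digits of m
def pvOddCount : Nat → Nat
  | 0 => 0
  | m+1 => (if (m+1) % 10 % 2 = 1 then 1 else 0) + pvOddCount ((m+1) / 10)
  termination_by m => m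
  decreasing_by exact Nat.div_lt_self (Nat.succ_pos m) (by omega)

lemma pvLoopA_eq (m : Nat) : ∀ acc curr, pvLoopA m acc curr = acc + 10 ^ curr * pvOdds m := by
  induction m using Nat.strong_induction_on with
  | _ m ih =>
    intro acc curr
    match m with
    | 0 => simp [pvLoopA, pvOdds]
    | m+1 =>
      rw [pvLoopA, pvOdds]
      have h10 : (m+1) % 10 < 10 := Nat.mod_lt _ (by omega)
      have hlt : (m+1) / 10 < m + 1 := Nat.div_lt_self (Nat.succ_pos m) (by omega)
      by_cases hodd : (m+1) % 10 % 2 = 1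
      · have hmem : (((m+1) % 10 : Nat) : Int) = 1 ∨ (((m+1) % 10 : Nat) : Int) = 3 ∨
            (((m+1) % 10 : Nat) : Int) = 5 ∨ (((m+1) % 10 : Nat) : Int) = 7 ∨
            (((m+1) % 10 : Nat) : Int) = 9 := by omega
        simp only [hmem, if_true, hodd, ih _ hlt]
        ring
      · have hmem : ¬ ((((m+1) % 10 : Nat) : Int) = 1 ∨ (((m+1) % 10 : Nat) : Int) = 3 ∨
            (((m+1) % 10 : Nat) : Int) = 5 ∨ (((m+1) % 10 : Nat) : Int) = 7 ∨
            (((m+1) % 10 : Nat) : Int) = 9) := by omega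
        simp only [hmem, if_false, hodd, ih _ hlt]

-- structural form of Nat.toDigits 10 via the accumulator of toDigitsCore
lemma pvToDigitsCore_acc (f : Nat) : ∀ n acc, Nat.toDigitsCore 10 f n acc = Nat.toDigitsCore 10 f n [] ++ acc := by
  induction f with
  | zero => intro n acc; simp [Nat.toDigitsCore]
  | succ f ih =>
    intro n acc
    simp only [Nat.toDigitsCore]
    by_cases h : n / 10 = 0
    · simp [h]
    · simp only [h, if_false]
      rw [ih (n / 10) [Nat.digitChar (n % 10)], ih (n / 10) (Nat.digitChar (n % 10) :: acc)]
      simp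

lemma pvToDigitsCore_fuel (n : Nat) : ∀ f, n < f →
    Nat.toDigitsCore 10 f n [] =
      (if n / 10 = 0 then [Nat.digitChar (n % 10)]
       else Nat.toDigitsCore 10 n (n / 10) [] ++ [Nat.digitChar (n % 10)]) := by
  induction n using Nat.strong_induction_on with
  | _ n ih =>
    intro f hf
    match f with
    | f+1 =>
      simp only [Nat.toDigitsCore]
      by_cases h : n / 10 = 0
      · simp [h, Nat.mod_eq_of_lt (by omega : n < 10)]
      · simp only [h, if_false]
        rw [pvToDigitsCore_acc]
        congr 1
        have hlt : n / 10 < n := Nat.div_lt_self (by omega) (by omega)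
        rw [ih (n / 10) hlt f (by omega), ih (n / 10) hlt n hlt]

lemma pvToDigits_step (n : Nat) (h : ¬ n / 10 = 0) :
    Nat.toDigits 10 n = Nat.toDigits 10 (n / 10) ++ [Nat.digitChar (n % 10)] := by
  show Nat.toDigitsCore 10 (n+1) n [] = Nat.toDigitsCore 10 (n/10+1) (n/10) [] ++ _
  rw [pvToDigitsCore_fuel n (n+1) (by omega), if_neg h,
      pvToDigitsCore_fuel (n/10) (n/10+1) (by omega),
      pvToDigitsCore_fuel (n/10) n (Nat.div_lt_self (by omega) (by omega))]

lemma pvToDigits_small (n : Nat) (h : n / 10 = 0) :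
    Nat.toDigits 10 n = [Nat.digitChar n] := by
  show Nat.toDigitsCore 10 (n+1) n [] = _
  rw [pvToDigitsCore_fuel n (n+1) (by omega), if_pos h, Nat.mod_eq_of_lt (by omega)]

-- B's fold step
def pvStep (acc : Int) (c : Char) : Int :=
  if c ∈ ['1', '3', '5', '7', '9'] then acc * 10 + ((c.toNat : Int) - 48) else acc

lemma pvStep_digitChar (d : Nat) (hd : d < 10) (acc : Int) :
    pvStep acc (Nat.digitChar d) =
      if d % 2 = 1 then acc * 10 + (d : Int) else acc := by
  interval_cases d <;> simp [pvStep, Nat.digitChar]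

lemma pvFold_eq (m : Nat) : ∀ acc : Int,
    (Nat.toDigits 10 m).foldl pvStep acc = acc * 10 ^ pvOddCount m + pvOdds m := by
  induction m using Nat.strong_induction_on with
  | _ m ih =>
    intro acc
    by_cases h : m / 10 = 0
    · rw [pvToDigits_small m h]
      match m with
      | 0 => simp [List.foldl, pvStep_digitChar 0 (by omega), pvOddCount, pvOdds]
      | m+1 =>
        have hm : m + 1 < 10 := by omega
        have h10 : (m+1) % 10 = m+1 := Nat.mod_eq_of_lt hm
        simp only [List.foldl, pvStep_digitChar (m+1) hm, pvOddCount, pvOdds, h, h10]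
        by_cases hodd : (m+1) % 2 = 1 <;> simp [hodd]
    · rw [pvToDigits_step m h, List.foldl_append]
      have hlt : m / 10 < m := Nat.div_lt_self (by omega) (by omega)
      match m with
      | m+1 =>
        rw [ih _ hlt]
        simp only [List.foldl, pvStep_digitChar ((m+1) % 10) (Nat.mod_lt _ (by omega))]
        rw [pvOdds, pvOddCount]
        by_cases hodd : (m+1) % 10 % 2 = 1
        · simp only [hodd, if_true]
          ring
        · simp only [hodd, if_false]
          ring_nf

-- ===== VERDICT (by name: the statement is the Claim_ definition above) =====
theorem formNumberFromOddDigits_spec : Claim_equal_formNumberFromOddDigits := by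
  intro n _ hn
  unfold Spec_formNumberFromOddDigits formNumberFromOddDigits formNumberFromOddDigits_alt
  show pvLoopA n.natAbs 0 0 * _ = ((PySem.Int.toChars |n|).foldl pvStep 0) * _
  simp only [PySem.Int.toChars, if_neg (not_lt.mpr (abs_nonneg n))]
  have htoNat : |n|.toNat = n.natAbs := by
    rw [Int.abs_eq_natAbs, Int.toNat_natCast]
  rw [htoNat, pvFold_eq, pvLoopA_eq]
  ring
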